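-- pv_equiv track=rewrite | github.com/muhamadanjar/fastapi-etl | app/transformers/entity_matcher.py | _metaphone
-- ===== SOURCE A (Python) =====
-- def _metaphone(name: str) -> str:
--     """Generate Metaphone code for name (simplified version)"""
--     # This is a simplified Metaphone implementation
--     # For production use, consider using a proper library
--     name = name.upper()
--
--     # Basic transformations
--     replacements = [
--         ('PH', 'F'), ('GH', 'F'), ('CK', 'K'), ('SCH', 'SK'),
--         ('TH', 'T'), ('SH', 'S'), ('CH', 'K')
--     ]
--
--     for old, new in replacements:
--         name = name.replace(old, new)
--
--     # Remove vowels except at the beginning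
--     if name:
--         result = name[0]
--         for char in name[1:]:
--             if char not in 'AEIOU':
--                 result += char
--     else:
--         result = name
--
--     return result[:4]  # Limit to 4 characters
-- ===== SOURCE B (Python) =====
-- def _metaphone(name: str) -> str:
--     """Generate Metaphone code for name (simplified version)"""
--     # Single left-to-right scan: map the trigraph/digraphs as they are met
--     # and drop vowels (except the very first output character) in the same pass.
--     s = name.upper()
--     out = []
--     i = 0
--     n = len(s)
--     while i < n:
--         if s.startswith('SCH', i):
--             chunk, step = 'SK', 3
--         elif s.startswith('PH', i) or s.startswith('GH', i):
--             chunk, step = 'F', 2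
--         elif s.startswith('CK', i):
--             chunk, step = 'K', 2
--         elif s.startswith('TH', i):
--             chunk, step = 'T', 2
--         elif s.startswith('SH', i):
--             chunk, step = 'S', 2
--         elif s.startswith('CH', i):
--             chunk, step = 'K', 2
--         else:
--             chunk, step = s[i], 1
--         for ch in chunk:
--             if not out or ch not in 'AEIOU':
--                 out.append(ch)
--         i += step
--     return ''.join(out[:4])
-- ===== Notes on version B (the rewrite author's own statement) =====
-- stated objective: alternative
-- what changed: Replaces seven sequential global str.replace passes plus a separate vowel-filter pass by a single left-to-right scan that matches SCH and the digraphs at each position, emits the mapped letters and drops non-leading vowels in the same pass.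
import Mathlib
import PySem

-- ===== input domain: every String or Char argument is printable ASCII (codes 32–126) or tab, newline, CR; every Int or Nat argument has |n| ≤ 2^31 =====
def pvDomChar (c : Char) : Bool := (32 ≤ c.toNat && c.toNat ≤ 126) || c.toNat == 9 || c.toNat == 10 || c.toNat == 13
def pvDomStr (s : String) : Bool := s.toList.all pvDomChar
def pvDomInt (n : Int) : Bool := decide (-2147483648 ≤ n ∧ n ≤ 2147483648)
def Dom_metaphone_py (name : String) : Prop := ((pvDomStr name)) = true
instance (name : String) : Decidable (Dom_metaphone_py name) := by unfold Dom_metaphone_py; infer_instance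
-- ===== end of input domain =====

-- B replaces A's seven sequential global str.replace passes by one left-to-right
-- scan that maps the trigraph/digraphs and drops non-leading vowels in the same pass.


-- ===== PORT A =====
-- literal transliteration: upper; seven global replaces in order; drop vowels
-- except the first character; truncate to 4
def metaphone_py (name : String) : String :=
  let name1 := PySem.Str.upper name
  let name2 := [("PH", "F"), ("GH", "F"), ("CK", "K"), ("SCH", "SK"),
                ("TH", "T"), ("SH", "S"), ("CH", "K")].foldl
      (fun s p => PySem.Str.replace s p.1 p.2) name1
  let result : List Char :=
    match name2.toList with
    | [] => []
    | c :: rest =>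
        rest.foldl (fun r ch => if ['A','E','I','O','U'].contains ch then r else r ++ [ch]) [c]
  String.ofList (PySem.List.slice result none (some 4))

-- ===== PORT B =====
-- one scan (Source B's while loop): at each position match SCH / PH|GH / CK / TH / SH / CH,
-- emit the mapped chunk, advance by the matched length; the inner for-loop over the
-- chunk (pvEmit) appends a character unless output is nonempty and it is a vowel.
def pvEmit (out : List Char) (chunk : List Char) : List Char :=
  chunk.foldl (fun a ch => if a.isEmpty || !(['A','E','I','O','U'].contains ch) then a ++ [ch] else a) out

def pvScanGo (out : List Char) : List Char → List Char
  | [] => out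
  | c :: t =>
    if ['S','C','H'].isPrefixOf (c :: t) then pvScanGo (pvEmit out ['S','K']) (t.drop 2)
    else if ['P','H'].isPrefixOf (c :: t) || ['G','H'].isPrefixOf (c :: t) then
      pvScanGo (pvEmit out ['F']) (t.drop 1)
    else if ['C','K'].isPrefixOf (c :: t) then pvScanGo (pvEmit out ['K']) (t.drop 1)
    else if ['T','H'].isPrefixOf (c :: t) then pvScanGo (pvEmit out ['T']) (t.drop 1)
    else if ['S','H'].isPrefixOf (c :: t) then pvScanGo (pvEmit out ['S']) (t.drop 1)
    else if ['C','H'].isPrefixOf (c :: t) then pvScanGo (pvEmit out ['K']) (t.drop 1)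
    else pvScanGo (pvEmit out [c]) t
  termination_by l => l.length
  decreasing_by all_goals simp [List.length_drop]

def metaphone_py_alt (name : String) : String :=
  String.ofList (PySem.List.slice (pvScanGo [] (PySem.Str.upper name).toList) none (some 4))

-- ===== PRECONDITION & SPEC =====
def Spec_metaphone_py (name : String) (out : String) : Prop := out = metaphone_py_alt name
instance (name : String) (out : String) : Decidable (Spec_metaphone_py name out) := by unfold Spec_metaphone_py; infer_instance

-- ===== CLAIM (what is proved, stated in full; the proofs are below) =====
def Claim_equal_metaphone_py : Prop := ∀ (name : String), Dom_metaphone_py name → Spec_metaphone_py name (metaphone_py name)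

-- ===== LEMMAS AND PROOFS =====

-- structural-recursion version of Python's str.replace for a nonempty pattern
def pvRepl (old new : List Char) : List Char → List Char
  | [] => []
  | c :: t =>
    if old.isPrefixOf (c :: t) then new ++ pvRepl old new (t.drop (old.length - 1))
    else c :: pvRepl old new t
  termination_by l => l.length
  decreasing_by all_goals simp [List.length_drop]

-- proof-only single-pass mapper (pvScanGo without the vowel accumulator)
def pvScan : List Char → List Char
  | [] => []
  | c :: t =>
    if ['S','C','H'].isPrefixOf (c :: t) then 'S' :: 'K' :: pvScan (t.drop 2)
    else if ['P','H'].isPrefixOf (c :: t) then 'F' :: pvScan (t.drop 1)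
    else if ['G','H'].isPrefixOf (c :: t) then 'F' :: pvScan (t.drop 1)
    else if ['C','K'].isPrefixOf (c :: t) then 'K' :: pvScan (t.drop 1)
    else if ['T','H'].isPrefixOf (c :: t) then 'T' :: pvScan (t.drop 1)
    else if ['S','H'].isPrefixOf (c :: t) then 'S' :: pvScan (t.drop 1)
    else if ['C','H'].isPrefixOf (c :: t) then 'K' :: pvScan (t.drop 1)
    else c :: pvScan t
  termination_by l => l.length
  decreasing_by all_goals simp [List.length_drop]

theorem pvRepl_nil (old new : List Char) : pvRepl old new [] = [] := by simp [pvRepl]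

theorem pvRepl_cons_pos (old new : List Char) (c : Char) (t : List Char)
    (h : old.isPrefixOf (c :: t) = true) :
    pvRepl old new (c :: t) = new ++ pvRepl old new (t.drop (old.length - 1)) := by
  rw [pvRepl]; simp [h]

theorem pvRepl_cons_neg (old new : List Char) (c : Char) (t : List Char)
    (h : old.isPrefixOf (c :: t) = false) :
    pvRepl old new (c :: t) = c :: pvRepl old new t := by
  rw [pvRepl]; simp [h]

-- go with enough fuel is pvRepl
theorem pvGo_eq (old new : List Char) (hold : old ≠ []) :
    ∀ (fuel : Nat) (l acc : List Char), l.length ≤ fuel →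
      PySem.Chars.replace.go old new fuel l acc = acc.reverse ++ pvRepl old new l := by
  intro fuel
  induction fuel with
  | zero =>
    intro l acc h
    have hl : l = [] := by cases l <;> simp_all
    subst hl
    simp [PySem.Chars.replace.go, pvRepl_nil]
  | succ f ih =>
    intro l acc h
    cases l with
    | nil => simp [PySem.Chars.replace.go, pvRepl_nil]
    | cons c t =>
      obtain ⟨k, hk⟩ : ∃ k, old.length = k + 1 := by
        cases old with
        | nil => exact absurd rfl hold
        | cons a b => exact ⟨b.length, rfl⟩
      rw [PySem.Chars.replace.go]
      by_cases hp : old.isPrefixOf (c :: t) = true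
      · simp only [hp, if_true]
        have hdrop : List.drop old.length (c :: t) = t.drop (old.length - 1) := by
          simp [hk, List.drop_succ_cons]
        rw [hdrop, ih _ _ (by simp at h ⊢; omega), pvRepl_cons_pos old new c t hp]
        simp
      · simp only [hp, if_false, Bool.false_eq_true]
        rw [ih _ _ (by simp at h ⊢; omega), pvRepl_cons_neg old new c t (by rw [Bool.eq_false_iff]; intro hc; exact hp (by simpa [List.isPrefixOf_iff_prefix] using hc))]
        simp

theorem replace_eq_pvRepl (s old new : List Char) (hold : old ≠ []) :
    PySem.Chars.replace s old new = pvRepl old new s := by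
  rw [PySem.Chars.replace]
  have : old.isEmpty = false := by cases old <;> simp_all
  rw [if_neg (by simp [this])]
  simpa using pvGo_eq old new hold s.length s [] le_rfl

-- the seven chained replaces
def pvChain (l : List Char) : List Char :=
  pvRepl ['C','H'] ['K'] (pvRepl ['S','H'] ['S'] (pvRepl ['T','H'] ['T']
    (pvRepl ['S','C','H'] ['S','K'] (pvRepl ['C','K'] ['K']
      (pvRepl ['G','H'] ['F'] (pvRepl ['P','H'] ['F'] l))))))

-- head of a replace result: never a character that neither the source head
-- nor the replacement head is
theorem pvRepl_head_ne (old new : List Char) (x : Char) (hnew : new ≠ [])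
    (h1 : new.head? ≠ some x) : ∀ l : List Char, l.head? ≠ some x →
    (pvRepl old new l).head? ≠ some x := by
  intro l hl
  cases l with
  | nil => simp [pvRepl_nil]
  | cons c t =>
    by_cases hp : old.isPrefixOf (c :: t) = true
    · rw [pvRepl_cons_pos _ _ _ _ hp]
      cases new with
      | nil => exact absurd rfl hnew
      | cons a b => simpa using h1
    · rw [pvRepl_cons_neg _ _ _ _ (by rw [Bool.eq_false_iff]; intro hc; exact hp (by simpa [List.isPrefixOf_iff_prefix] using hc))]
      simpa using hl

-- pass-through and match lemmas for literal patterns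
theorem pvNegHead (o1 c : Char) (h : (o1 == c) = false) (orest new m : List Char) :
    pvRepl (o1 :: orest) new (c :: m) = c :: pvRepl (o1 :: orest) new m :=
  pvRepl_cons_neg _ _ _ _ (by simp [List.isPrefixOf, h])

theorem pvNegSecond (o1 o2 c d : Char) (h : (o2 == d) = false) (orest new m : List Char) :
    pvRepl (o1 :: o2 :: orest) new (c :: d :: m) = c :: pvRepl (o1 :: o2 :: orest) new (d :: m) :=
  pvRepl_cons_neg _ _ _ _ (by simp [List.isPrefixOf, h])

theorem pvPos2 (o1 o2 : Char) (new m : List Char) :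
    pvRepl [o1, o2] new (o1 :: o2 :: m) = new ++ pvRepl [o1, o2] new m := by
  rw [pvRepl_cons_pos _ _ _ _ (by simp [List.isPrefixOf])]; simp

theorem pvPos3 (o1 o2 o3 : Char) (new m : List Char) :
    pvRepl [o1, o2, o3] new (o1 :: o2 :: o3 :: m) = new ++ pvRepl [o1, o2, o3] new m := by
  rw [pvRepl_cons_pos _ _ _ _ (by simp [List.isPrefixOf])]; simp

theorem pvShape2 (a b : Char) (l : List Char) (h : [a, b].isPrefixOf l = true) :
    ∃ m, l = a :: b :: m := by
  rw [List.isPrefixOf_iff_prefix] at h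
  obtain ⟨r, hr⟩ := h
  exact ⟨r, hr.symm⟩

theorem pvShape3 (a b c : Char) (l : List Char) (h : [a, b, c].isPrefixOf l = true) :
    ∃ m, l = a :: b :: c :: m := by
  rw [List.isPrefixOf_iff_prefix] at h
  obtain ⟨r, hr⟩ := h
  exact ⟨r, hr.symm⟩

theorem pvPfx2_false_of (o1 o2 c : Char) (m : List Char)
    (h : (o1 == c) = false ∨ m.head? ≠ some o2) :
    [o1, o2].isPrefixOf (c :: m) = false := by
  rcases h with h | h
  · simp [List.isPrefixOf, h]
  · cases m <;> simp_all [List.isPrefixOf]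
    intro h1
    simpa [eq_comm] using h

theorem pvPfx2_false_head (o1 o2 : Char) (l : List Char) (h : l.head? ≠ some o1) :
    [o1, o2].isPrefixOf l = false := by
  cases l <;> simp_all [List.isPrefixOf]
  intro h1; exact absurd h1.symm h

theorem pvPfx3_false_head (o1 o2 o3 : Char) (l : List Char) (h : l.head? ≠ some o1) :
    [o1, o2, o3].isPrefixOf l = false := by
  cases l <;> simp_all [List.isPrefixOf]
  intro h1; exact absurd h1.symm h

theorem pvPfx2_elim (o1 o2 c : Char) (t : List Char)
    (h : [o1, o2].isPrefixOf (c :: t) = false) :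
    (o1 == c) = false ∨ t.head? ≠ some o2 := by
  by_cases hc : (o1 == c) = false
  · exact Or.inl hc
  · right
    have hc' : o1 = c := by simpa using hc
    subst hc'
    cases t <;> simp_all [List.isPrefixOf]
    exact fun h1 => h h1.symm

-- the one non-mechanical transfer: if t has no 'CH' prefix and does not start with 'H',
-- neither does the image of t under the PH-, GH- and CK-replaces
theorem pvSchTransfer (t : List Char)
    (h1 : ['C','H'].isPrefixOf t = false) (h2 : t.head? ≠ some 'H') :
    ['C','H'].isPrefixOf
      (pvRepl ['C','K'] ['K'] (pvRepl ['G','H'] ['F'] (pvRepl ['P','H'] ['F'] t))) = false := by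
  cases t with
  | nil => simp [pvRepl_nil]
  | cons a u =>
    by_cases hc : a = 'C'
    · subst hc
      have hu : u.head? ≠ some 'H' := by
        cases u <;> simp_all [List.isPrefixOf]
        exact fun e => h1 e.symm
      rw [pvNegHead 'P' 'C' (by decide), pvNegHead 'G' 'C' (by decide)]
      have hm'h : (pvRepl ['G','H'] ['F'] (pvRepl ['P','H'] ['F'] u)).head? ≠ some 'H' :=
        pvRepl_head_ne _ _ _ (by simp) (by decide) _
          (pvRepl_head_ne _ _ _ (by simp) (by decide) _ hu)
      by_cases q : (['C','K'].isPrefixOf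
          ('C' :: pvRepl ['G','H'] ['F'] (pvRepl ['P','H'] ['F'] u))) = true
      · rw [pvRepl_cons_pos _ _ _ _ q]
        simp [List.isPrefixOf]
      · rw [pvRepl_cons_neg _ _ _ _ (Bool.eq_false_iff.mpr q)]
        exact pvPfx2_false_of 'C' 'H' 'C' _
          (Or.inr (pvRepl_head_ne _ _ _ (by simp) (by decide) _ hm'h))
    · have h3 : (a :: u).head? ≠ some 'C' := by simpa using hc
      exact pvPfx2_false_head _ _ _
        (pvRepl_head_ne _ _ _ (by simp) (by decide) _
          (pvRepl_head_ne _ _ _ (by simp) (by decide) _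
            (pvRepl_head_ne _ _ _ (by simp) (by decide) _ h3)))

theorem pvChain_eq_pvScan : ∀ (n : Nat) (l : List Char), l.length ≤ n → pvChain l = pvScan l := by
  intro n
  induction n with
  | zero =>
    intro l h
    have hl : l = [] := by cases l <;> simp_all
    subst hl
    simp [pvChain, pvRepl_nil, pvScan]
  | succ n ih =>
    intro l h
    cases l with
    | nil => simp [pvChain, pvRepl_nil, pvScan]
    | cons c t =>
      by_cases hSCH : (['S','C','H'].isPrefixOf (c :: t)) = true
      · obtain ⟨m, hm⟩ := pvShape3 _ _ _ _ hSCH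
        rw [hm] at h ⊢
        have hm' : m.length ≤ n := by simp at h; omega
        have hscan : pvScan ('S'::'C'::'H'::m) = 'S'::'K'::pvScan m := by
          rw [pvScan]; simp [List.isPrefixOf]
        rw [hscan, ← ih m hm']
        unfold pvChain
        rw [pvNegHead 'P' 'S' (by decide), pvNegHead 'P' 'C' (by decide), pvNegHead 'P' 'H' (by decide),
            pvNegHead 'G' 'S' (by decide), pvNegHead 'G' 'C' (by decide), pvNegHead 'G' 'H' (by decide),
            pvNegHead 'C' 'S' (by decide), pvNegSecond 'C' 'K' 'C' 'H' (by decide), pvNegHead 'C' 'H' (by decide),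
            pvPos3 'S' 'C' 'H' ['S','K']]
        simp only [List.cons_append, List.nil_append]
        rw [pvNegHead 'T' 'S' (by decide), pvNegHead 'T' 'K' (by decide),
            pvNegSecond 'S' 'H' 'S' 'K' (by decide), pvNegHead 'S' 'K' (by decide),
            pvNegHead 'C' 'S' (by decide), pvNegHead 'C' 'K' (by decide)]
      · by_cases hPH : (['P','H'].isPrefixOf (c :: t)) = true
        · obtain ⟨m, hm⟩ := pvShape2 _ _ _ hPH
          rw [hm] at h ⊢
          have hm' : m.length ≤ n := by simp at h; omega
          have hscan : pvScan ('P'::'H'::m) = 'F'::pvScan m := by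
            rw [pvScan]; simp [List.isPrefixOf]
          rw [hscan, ← ih m hm']
          unfold pvChain
          rw [pvPos2 'P' 'H' ['F']]
          simp only [List.cons_append, List.nil_append]
          rw [pvNegHead 'G' 'F' (by decide), pvNegHead 'C' 'F' (by decide),
              pvNegHead 'S' 'F' (by decide), pvNegHead 'T' 'F' (by decide),
              pvNegHead 'S' 'F' (by decide), pvNegHead 'C' 'F' (by decide)]
        · by_cases hGH : (['G','H'].isPrefixOf (c :: t)) = true
          · obtain ⟨m, hm⟩ := pvShape2 _ _ _ hGH
            rw [hm] at h ⊢
            have hm' : m.length ≤ n := by simp at h; omega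
            have hscan : pvScan ('G'::'H'::m) = 'F'::pvScan m := by
              rw [pvScan]; simp [List.isPrefixOf]
            rw [hscan, ← ih m hm']
            unfold pvChain
            rw [pvNegHead 'P' 'G' (by decide), pvNegHead 'P' 'H' (by decide),
                pvPos2 'G' 'H' ['F']]
            simp only [List.cons_append, List.nil_append]
            rw [pvNegHead 'C' 'F' (by decide), pvNegHead 'S' 'F' (by decide),
                pvNegHead 'T' 'F' (by decide), pvNegHead 'S' 'F' (by decide),
                pvNegHead 'C' 'F' (by decide)]
          · by_cases hCK : (['C','K'].isPrefixOf (c :: t)) = true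
            · obtain ⟨m, hm⟩ := pvShape2 _ _ _ hCK
              rw [hm] at h ⊢
              have hm' : m.length ≤ n := by simp at h; omega
              have hscan : pvScan ('C'::'K'::m) = 'K'::pvScan m := by
                rw [pvScan]; simp [List.isPrefixOf]
              rw [hscan, ← ih m hm']
              unfold pvChain
              rw [pvNegHead 'P' 'C' (by decide), pvNegHead 'P' 'K' (by decide),
                  pvNegHead 'G' 'C' (by decide), pvNegHead 'G' 'K' (by decide),
                  pvPos2 'C' 'K' ['K']]
              simp only [List.cons_append, List.nil_append]
              rw [pvNegHead 'S' 'K' (by decide), pvNegHead 'T' 'K' (by decide),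
                  pvNegHead 'S' 'K' (by decide), pvNegHead 'C' 'K' (by decide)]
            · by_cases hTH : (['T','H'].isPrefixOf (c :: t)) = true
              · obtain ⟨m, hm⟩ := pvShape2 _ _ _ hTH
                rw [hm] at h ⊢
                have hm' : m.length ≤ n := by simp at h; omega
                have hscan : pvScan ('T'::'H'::m) = 'T'::pvScan m := by
                  rw [pvScan]; simp [List.isPrefixOf]
                rw [hscan, ← ih m hm']
                unfold pvChain
                rw [pvNegHead 'P' 'T' (by decide), pvNegHead 'P' 'H' (by decide),
                    pvNegHead 'G' 'T' (by decide), pvNegHead 'G' 'H' (by decide),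
                    pvNegHead 'C' 'T' (by decide), pvNegHead 'C' 'H' (by decide),
                    pvNegHead 'S' 'T' (by decide), pvNegHead 'S' 'H' (by decide),
                    pvPos2 'T' 'H' ['T']]
                simp only [List.cons_append, List.nil_append]
                rw [pvNegHead 'S' 'T' (by decide), pvNegHead 'C' 'T' (by decide)]
              · by_cases hSH : (['S','H'].isPrefixOf (c :: t)) = true
                · obtain ⟨m, hm⟩ := pvShape2 _ _ _ hSH
                  rw [hm] at hSCH h ⊢
                  have hm' : m.length ≤ n := by simp at h; omega
                  have hscan : pvScan ('S'::'H'::m) = 'S'::pvScan m := by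
                    rw [pvScan]; simp [List.isPrefixOf]
                  rw [hscan, ← ih m hm']
                  unfold pvChain
                  rw [pvNegHead 'P' 'S' (by decide), pvNegHead 'P' 'H' (by decide),
                      pvNegHead 'G' 'S' (by decide), pvNegHead 'G' 'H' (by decide),
                      pvNegHead 'C' 'S' (by decide), pvNegHead 'C' 'H' (by decide),
                      pvNegSecond 'S' 'C' 'S' 'H' (by decide), pvNegHead 'S' 'H' (by decide),
                      pvNegHead 'T' 'S' (by decide), pvNegHead 'T' 'H' (by decide),
                      pvPos2 'S' 'H' ['S']]
                  simp only [List.cons_append, List.nil_append]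
                  rw [pvNegHead 'C' 'S' (by decide)]
                · by_cases hCH : (['C','H'].isPrefixOf (c :: t)) = true
                  · obtain ⟨m, hm⟩ := pvShape2 _ _ _ hCH
                    rw [hm] at h ⊢
                    have hm' : m.length ≤ n := by simp at h; omega
                    have hscan : pvScan ('C'::'H'::m) = 'K'::pvScan m := by
                      rw [pvScan]; simp [List.isPrefixOf]
                    rw [hscan, ← ih m hm']
                    unfold pvChain
                    rw [pvNegHead 'P' 'C' (by decide), pvNegHead 'P' 'H' (by decide),
                        pvNegHead 'G' 'C' (by decide), pvNegHead 'G' 'H' (by decide),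
                        pvNegSecond 'C' 'K' 'C' 'H' (by decide), pvNegHead 'C' 'H' (by decide),
                        pvNegHead 'S' 'C' (by decide), pvNegHead 'S' 'H' (by decide),
                        pvNegHead 'T' 'C' (by decide), pvNegHead 'T' 'H' (by decide),
                        pvNegHead 'S' 'C' (by decide), pvNegHead 'S' 'H' (by decide),
                        pvPos2 'C' 'H' ['K']]
                    simp only [List.cons_append, List.nil_append]
                  · -- default: no pattern matches at the head
                    have hSCH' : (['S','C','H'].isPrefixOf (c :: t)) = false := Bool.eq_false_iff.mpr hSCH
                    have hPH' : (['P','H'].isPrefixOf (c :: t)) = false := Bool.eq_false_iff.mpr hPH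
                    have hGH' : (['G','H'].isPrefixOf (c :: t)) = false := Bool.eq_false_iff.mpr hGH
                    have hCK' : (['C','K'].isPrefixOf (c :: t)) = false := Bool.eq_false_iff.mpr hCK
                    have hTH' : (['T','H'].isPrefixOf (c :: t)) = false := Bool.eq_false_iff.mpr hTH
                    have hSH' : (['S','H'].isPrefixOf (c :: t)) = false := Bool.eq_false_iff.mpr hSH
                    have hCH' : (['C','H'].isPrefixOf (c :: t)) = false := Bool.eq_false_iff.mpr hCH
                    have ht : t.length ≤ n := by simp at h; omega
                    have hscan : pvScan (c :: t) = c :: pvScan t := by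
                      rw [pvScan]; simp [hSCH', hPH', hGH', hCK', hTH', hSH', hCH']
                    -- step conditions on the intermediate lists
                    have e2 : (['G','H'].isPrefixOf (c :: pvRepl ['P','H'] ['F'] t)) = false := by
                      rcases pvPfx2_elim 'G' 'H' c t hGH' with hc | hh
                      · exact pvPfx2_false_of _ _ _ _ (Or.inl hc)
                      · exact pvPfx2_false_of _ _ _ _
                          (Or.inr (pvRepl_head_ne _ _ _ (by simp) (by decide) t hh))
                    have e3 : (['C','K'].isPrefixOf
                        (c :: pvRepl ['G','H'] ['F'] (pvRepl ['P','H'] ['F'] t))) = false := by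
                      rcases pvPfx2_elim 'C' 'K' c t hCK' with hc | hh
                      · exact pvPfx2_false_of _ _ _ _ (Or.inl hc)
                      · exact pvPfx2_false_of _ _ _ _
                          (Or.inr (pvRepl_head_ne _ _ _ (by simp) (by decide) _
                            (pvRepl_head_ne _ _ _ (by simp) (by decide) t hh)))
                    have e4 : (['S','C','H'].isPrefixOf (c :: pvRepl ['C','K'] ['K']
                        (pvRepl ['G','H'] ['F'] (pvRepl ['P','H'] ['F'] t)))) = false := by
                      by_cases hc : ('S' == c) = false
                      · refine pvPfx3_false_head _ _ _ _ ?_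
                        simp only [List.head?_cons, ne_eq, Option.some.injEq]
                        intro e; rw [e] at hc; simp at hc
                      · have hc' : c = 'S' := by
                          exact (eq_of_beq (Bool.ne_false_iff.mp hc)).symm
                        subst hc'
                        have hCHt : ['C','H'].isPrefixOf t = false := by
                          simpa [List.isPrefixOf] using hSCH'
                        have hth : t.head? ≠ some 'H' := by
                          rcases pvPfx2_elim 'S' 'H' 'S' t hSH' with hx | hx
                          · simp at hx
                          · exact hx
                        have := pvSchTransfer t hCHt hth
                        simp [List.isPrefixOf, this]
                    have e5 : (['T','H'].isPrefixOf (c :: pvRepl ['S','C','H'] ['S','K']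
                        (pvRepl ['C','K'] ['K'] (pvRepl ['G','H'] ['F']
                          (pvRepl ['P','H'] ['F'] t))))) = false := by
                      rcases pvPfx2_elim 'T' 'H' c t hTH' with hc | hh
                      · exact pvPfx2_false_of _ _ _ _ (Or.inl hc)
                      · exact pvPfx2_false_of _ _ _ _
                          (Or.inr (pvRepl_head_ne _ _ _ (by simp) (by decide) _
                            (pvRepl_head_ne _ _ _ (by simp) (by decide) _
                              (pvRepl_head_ne _ _ _ (by simp) (by decide) _
                                (pvRepl_head_ne _ _ _ (by simp) (by decide) t hh)))))
                    have e6 : (['S','H'].isPrefixOf (c :: pvRepl ['T','H'] ['T']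
                        (pvRepl ['S','C','H'] ['S','K'] (pvRepl ['C','K'] ['K']
                          (pvRepl ['G','H'] ['F'] (pvRepl ['P','H'] ['F'] t)))))) = false := by
                      rcases pvPfx2_elim 'S' 'H' c t hSH' with hc | hh
                      · exact pvPfx2_false_of _ _ _ _ (Or.inl hc)
                      · exact pvPfx2_false_of _ _ _ _
                          (Or.inr (pvRepl_head_ne _ _ _ (by simp) (by decide) _
                            (pvRepl_head_ne _ _ _ (by simp) (by decide) _
                              (pvRepl_head_ne _ _ _ (by simp) (by decide) _
                                (pvRepl_head_ne _ _ _ (by simp) (by decide) _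
                                  (pvRepl_head_ne _ _ _ (by simp) (by decide) t hh))))))
                    have e7 : (['C','H'].isPrefixOf (c :: pvRepl ['S','H'] ['S']
                        (pvRepl ['T','H'] ['T'] (pvRepl ['S','C','H'] ['S','K']
                          (pvRepl ['C','K'] ['K'] (pvRepl ['G','H'] ['F']
                            (pvRepl ['P','H'] ['F'] t))))))) = false := by
                      rcases pvPfx2_elim 'C' 'H' c t hCH' with hc | hh
                      · exact pvPfx2_false_of _ _ _ _ (Or.inl hc)
                      · exact pvPfx2_false_of _ _ _ _
                          (Or.inr (pvRepl_head_ne _ _ _ (by simp) (by decide) _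
                            (pvRepl_head_ne _ _ _ (by simp) (by decide) _
                              (pvRepl_head_ne _ _ _ (by simp) (by decide) _
                                (pvRepl_head_ne _ _ _ (by simp) (by decide) _
                                  (pvRepl_head_ne _ _ _ (by simp) (by decide) _
                                    (pvRepl_head_ne _ _ _ (by simp) (by decide) t hh)))))))
                    rw [hscan, ← ih t ht]
                    unfold pvChain
                    rw [pvRepl_cons_neg _ _ _ _ hPH', pvRepl_cons_neg _ _ _ _ e2,
                        pvRepl_cons_neg _ _ _ _ e3, pvRepl_cons_neg _ _ _ _ e4,
                        pvRepl_cons_neg _ _ _ _ e5, pvRepl_cons_neg _ _ _ _ e6,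
                        pvRepl_cons_neg _ _ _ _ e7]

-- pvScanGo is pvEmit applied to pvScan's output
theorem pvEmit_append (out a b : List Char) : pvEmit out (a ++ b) = pvEmit (pvEmit out a) b := by
  simp [pvEmit, List.foldl_append]

theorem pvScanGo_eq : ∀ (n : Nat) (l out : List Char), l.length ≤ n →
    pvScanGo out l = pvEmit out (pvScan l) := by
  intro n
  induction n with
  | zero =>
    intro l out h
    have hl : l = [] := by cases l <;> simp_all
    subst hl
    simp [pvScanGo, pvScan, pvEmit]
  | succ n ih =>
    intro l out h
    cases l with
    | nil => simp [pvScanGo, pvScan, pvEmit]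
    | cons c t =>
      have h2 : (t.drop 2).length ≤ n := by simp at h ⊢; omega
      have h1 : (t.drop 1).length ≤ n := by simp at h ⊢; omega
      have h0 : t.length ≤ n := by simp at h; omega
      rw [pvScanGo, pvScan]
      by_cases hSCH : (['S','C','H'].isPrefixOf (c :: t)) = true
      · simp only [hSCH, if_true]
        rw [ih _ _ h2, show ('S'::'K'::pvScan (t.drop 2) : List Char)
            = ['S','K'] ++ pvScan (t.drop 2) from rfl, pvEmit_append]
      · simp only [hSCH, Bool.false_eq_true, if_false]
        by_cases hPH : (['P','H'].isPrefixOf (c :: t)) = true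
        · simp only [hPH, Bool.true_or, if_true]
          rw [ih _ _ h1, show ('F'::pvScan (t.drop 1) : List Char)
              = ['F'] ++ pvScan (t.drop 1) from rfl, pvEmit_append]
        · simp only [hPH, Bool.false_eq_true, if_false, Bool.false_or]
          by_cases hGH : (['G','H'].isPrefixOf (c :: t)) = true
          · simp only [hGH, if_true]
            rw [ih _ _ h1, show ('F'::pvScan (t.drop 1) : List Char)
                = ['F'] ++ pvScan (t.drop 1) from rfl, pvEmit_append]
          · simp only [hGH, Bool.false_eq_true, if_false]
            by_cases hCK : (['C','K'].isPrefixOf (c :: t)) = true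
            · simp only [hCK, if_true]
              rw [ih _ _ h1, show ('K'::pvScan (t.drop 1) : List Char)
                  = ['K'] ++ pvScan (t.drop 1) from rfl, pvEmit_append]
            · simp only [hCK, Bool.false_eq_true, if_false]
              by_cases hTH : (['T','H'].isPrefixOf (c :: t)) = true
              · simp only [hTH, if_true]
                rw [ih _ _ h1, show ('T'::pvScan (t.drop 1) : List Char)
                    = ['T'] ++ pvScan (t.drop 1) from rfl, pvEmit_append]
              · simp only [hTH, Bool.false_eq_true, if_false]
                by_cases hSH : (['S','H'].isPrefixOf (c :: t)) = true
                · simp only [hSH, if_true]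
                  rw [ih _ _ h1, show ('S'::pvScan (t.drop 1) : List Char)
                      = ['S'] ++ pvScan (t.drop 1) from rfl, pvEmit_append]
                · simp only [hSH, Bool.false_eq_true, if_false]
                  by_cases hCH : (['C','H'].isPrefixOf (c :: t)) = true
                  · simp only [hCH, if_true]
                    rw [ih _ _ h1, show ('K'::pvScan (t.drop 1) : List Char)
                        = ['K'] ++ pvScan (t.drop 1) from rfl, pvEmit_append]
                  · simp only [hCH, Bool.false_eq_true, if_false]
                    rw [ih _ _ h0, show (c::pvScan t : List Char)
                        = [c] ++ pvScan t from rfl, pvEmit_append]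

-- A's vowel fold equals pvEmit from a nonempty accumulator
theorem pvEmit_of_ne : ∀ (l a : List Char), a ≠ [] →
    pvEmit a l = l.foldl (fun r ch => if ['A','E','I','O','U'].contains ch then r else r ++ [ch]) a := by
  intro l
  induction l with
  | nil => intro a _; rfl
  | cons ch rest ih =>
    intro a ha
    have hne : a.isEmpty = false := by cases a with
      | nil => exact absurd rfl ha
      | cons x xs => rfl
    have hcons : pvEmit a (ch :: rest)
        = pvEmit (if a.isEmpty || !(['A','E','I','O','U'].contains ch) then a ++ [ch] else a) rest := by
      simp [pvEmit]
    rw [hcons, List.foldl_cons]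
    by_cases hv : (['A','E','I','O','U'].contains ch) = true
    · simp only [hne, hv, Bool.not_true, Bool.or_false, if_false, if_true, Bool.false_eq_true]
      exact ih a ha
    · have hv' : (['A','E','I','O','U'].contains ch) = false := by simpa using hv
      simp only [hne, hv', Bool.not_false, Bool.or_true, if_true, if_false, Bool.false_eq_true]
      exact ih (a ++ [ch]) (by simp)

-- A's vowel step on the mapped list equals pvEmit from the empty accumulator
theorem pvEmit_nil_eq (X : List Char) :
    pvEmit [] X = (match X with
      | [] => ([] : List Char)
      | c :: rest =>
          rest.foldl (fun r ch => if ['A','E','I','O','U'].contains ch then r else r ++ [ch]) [c]) := by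
  cases X with
  | nil => rfl
  | cons c rest =>
    have : pvEmit ([] : List Char) (c :: rest) = pvEmit [c] rest := by simp [pvEmit]
    rw [this]
    exact pvEmit_of_ne rest [c] (by simp)

-- ===== VERDICT (by name: the statement is the Claim_ definition above) =====
theorem metaphone_py_spec : Claim_equal_metaphone_py := by
  unfold Claim_equal_metaphone_py Spec_metaphone_py
  intro name _
  unfold metaphone_py metaphone_py_alt
  simp only [List.foldl_cons, List.foldl_nil]
  have hA : (PySem.Str.replace (PySem.Str.replace (PySem.Str.replace (PySem.Str.replace
      (PySem.Str.replace (PySem.Str.replace (PySem.Str.replace (PySem.Str.upper name)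
        "PH" "F") "GH" "F") "CK" "K") "SCH" "SK") "TH" "T") "SH" "S") "CH" "K").toList
      = pvScan (PySem.Str.upper name).toList := by
    simp only [PySem.Str.toList_replace]
    rw [replace_eq_pvRepl _ _ _ (by simp), replace_eq_pvRepl _ _ _ (by simp),
        replace_eq_pvRepl _ _ _ (by simp), replace_eq_pvRepl _ _ _ (by simp),
        replace_eq_pvRepl _ _ _ (by simp), replace_eq_pvRepl _ _ _ (by simp),
        replace_eq_pvRepl _ _ _ (by simp)]
    exact pvChain_eq_pvScan (PySem.Str.upper name).toList.length _ le_rfl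
  rw [hA, pvScanGo_eq (PySem.Str.upper name).toList.length _ _ le_rfl, pvEmit_nil_eq]
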